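-- pv_equiv track=rewrite | github.com/olus2000/esolangs-reverse-engineering | 4/compiler/emulator.py | compile_int
-- ===== SOURCE A (Python) =====
-- def compile_int(n):
--     x = []
--     while n:
--         x.append(n % 2)
--         n //= 2
--     x.append(0)
--     x.extend([1] * (len(x) - 1))
--     return list(reversed(x))
-- ===== SOURCE B (Python) =====
-- def compile_int(n):
--     L = n.bit_length()
--     return [1] * L + [0] + [(n >> i) & 1 for i in range(L - 1, -1, -1)]
-- ===== Notes on version B (the rewrite author's own statement) =====
-- stated objective: simpler
-- what changed: B computes the bit length explicitly and builds the answer in one expression [1]*L + [0] + MSB-first bits via a shift comprehension, eliminating A's LSB-first while-loop accumulator, the append-0/len-1 padding trick, and the final reverse.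
import Mathlib
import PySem

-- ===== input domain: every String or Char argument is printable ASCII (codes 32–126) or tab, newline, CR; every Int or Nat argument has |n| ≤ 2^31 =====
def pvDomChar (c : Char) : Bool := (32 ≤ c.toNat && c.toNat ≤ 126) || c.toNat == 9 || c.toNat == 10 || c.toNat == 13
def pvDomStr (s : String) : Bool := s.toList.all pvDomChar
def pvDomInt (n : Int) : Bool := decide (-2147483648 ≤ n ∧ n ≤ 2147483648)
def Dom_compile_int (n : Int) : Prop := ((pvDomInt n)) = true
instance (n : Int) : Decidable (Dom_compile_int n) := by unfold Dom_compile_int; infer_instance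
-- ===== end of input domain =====

-- B replaces A's LSB-first while-loop + append-0 + len-1 padding + reverse by an explicit
-- bit_length and a single MSB-first shift comprehension (objective: simpler).

-- ===== PORT A =====
-- while n: x.append(n % 2); n //= 2   (Python diverges for n < 0; the guard 0 < n only
-- makes the same computation total — inputs with n < 0 are excluded by Pre_ below)
def compileLoopA (n : Int) (x : List Int) : List Int :=
  if _h : 0 < n then compileLoopA (PySem.Int.floordiv n 2) (x ++ [PySem.Int.mod n 2]) else x
  termination_by n.toNat
  decreasing_by
    rw [PySem.Int.floordiv_eq_ediv_of_pos (by omega)]; omega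

def compile_int (n : Int) : List Int :=
  let x1 := compileLoopA n []
  let x2 := x1 ++ [0]
  let x3 := x2 ++ List.replicate (x2.length - 1) 1
  x3.reverse

-- ===== PORT B =====
def compile_int_alt (n : Int) : List Int :=
  let L := PySem.Int.bitLength n
  List.replicate L (1 : Int) ++ [(0 : Int)]
    ++ (PySem.List.pyRange ((L : Int) - 1) (-1) (-1)).map
        (fun i => PySem.Int.band (n >>> i.toNat) 1)

-- ===== PRECONDITION & SPEC =====
-- Pre_ excludes n < 0, on which Python A's while-loop never terminates (n //= 2 stalls at -1).
def Pre_compile_int (n : Int) : Prop := 0 ≤ n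
instance (n : Int) : Decidable (Pre_compile_int n) := by unfold Pre_compile_int; infer_instance
def pvWitness_compile_int : Int := (5)

def Spec_compile_int (n : Int) (out : List Int) : Prop := out = compile_int_alt n
instance (n : Int) (out : List Int) : Decidable (Spec_compile_int n out) := by unfold Spec_compile_int; infer_instance

-- ===== CLAIM (what is proved, stated in full; the proofs are below) =====
def Claim_equal_compile_int : Prop := ∀ (n : Int), Dom_compile_int n → Pre_compile_int n → Spec_compile_int n (compile_int n)

-- ===== LEMMAS AND PROOFS =====

-- accumulator-free view of A's loop (proof helper)
def bitsA (n : Int) : List Int :=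
  if _h : 0 < n then PySem.Int.mod n 2 :: bitsA (PySem.Int.floordiv n 2) else []
  termination_by n.toNat
  decreasing_by
    rw [PySem.Int.floordiv_eq_ediv_of_pos (by omega)]; omega

theorem compileLoopA_eq (n : Int) : ∀ x, compileLoopA n x = x ++ bitsA n := by
  induction n using bitsA.induct with
  | case1 n h ih =>
      intro x
      rw [compileLoopA, dif_pos h, bitsA, dif_pos h, ih]
      simp
  | case2 n h =>
      intro x
      rw [compileLoopA, dif_neg h, bitsA, dif_neg h]
      simp

theorem bitsA_eq_nat (m : Nat) :
    bitsA (m : Int) =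
      (PySem.List.pyRange 0 (PySem.Int.bitLength (m : Int)) 1).map
        (fun i => PySem.Int.band ((m : Int) >>> i.toNat) 1) := by
  induction m using Nat.strong_induction_on with
  | _ m ih =>
    by_cases hm : 0 < m
    · have hm' : (0 : Int) < (m : Int) := by exact_mod_cast hm
      rw [bitsA, dif_pos hm']
      have hdiv : PySem.Int.floordiv (m : Int) 2 = ((m / 2 : Nat) : Int) :=
        PySem.Int.floordiv_natCast m 2
      have hbl : PySem.Int.bitLength (m : Int) = PySem.Int.bitLength ((m / 2 : Nat) : Int) + 1 :=
        PySem.Int.bitLength_natCast hm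
      rw [hbl]
      have hL : ((PySem.Int.bitLength ((m / 2 : Nat) : Int) + 1 : Nat) : Int) =
          ((PySem.Int.bitLength ((m / 2 : Nat) : Int) : Nat) : Int) + 1 := by push_cast; ring
      rw [hL, PySem.List.pyRange_one_cons (by omega)]
      simp only [List.map_cons]
      rw [hdiv, ih (m / 2) (Nat.div_lt_self hm (by omega))]
      congr 1
      · -- head: m % 2 = (m >>> 0) & 1
        rw [PySem.Int.band_one]
        congr 1
      · -- tail: bits of m / 2 = shifts of m by one more
        rw [PySem.List.pyRange_one, PySem.List.pyRange_one]
        simp only [List.map_map]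
        have hr : (((PySem.Int.bitLength ((m / 2 : Nat) : Int) : Nat) : Int) + 1 - (0 + 1)).toNat
            = (((PySem.Int.bitLength ((m / 2 : Nat) : Int) : Nat) : Int) - 0).toNat := by omega
        rw [hr]
        apply List.map_congr_left
        intro k hk
        simp only [Function.comp]
        rw [show ((0 : Int) + (k : Int)).toNat = k by omega,
            show ((0 : Int) + 1 + (k : Int)).toNat = k + 1 by omega]
        congr 1
        rw [Int.shiftRight_natCast_right, Int.shiftRight_natCast_right,
            Int.shiftRight_eq_div_pow, Int.shiftRight_eq_div_pow]
        rw [← Int.natCast_div, ← Int.natCast_div]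
        norm_cast
        rw [Nat.div_div_eq_div_mul]
        congr 1
        rw [pow_succ]; ring
    · have hm0 : m = 0 := by omega
      subst hm0
      rw [bitsA, dif_neg (by norm_num)]
      simp [PySem.Int.bitLength_zero]

theorem bitsA_length (m : Nat) : (bitsA (m : Int)).length = PySem.Int.bitLength (m : Int) := by
  rw [bitsA_eq_nat]
  simp [PySem.List.length_pyRange_one]

-- ===== VERDICT (by name: the statement is the Claim_ definition above) =====
theorem compile_int_spec : Claim_equal_compile_int := by
  intro n _ hpre
  have h0 : (0 : Int) ≤ n := hpre
  unfold Spec_compile_int compile_int compile_int_alt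
  obtain ⟨m, rfl⟩ : ∃ m : Nat, n = (m : Int) := ⟨n.toNat, by omega⟩
  simp only []
  rw [compileLoopA_eq]
  rw [List.nil_append]
  have hlen : ((bitsA (m : Int) ++ [0]).length - 1) = (bitsA (m : Int)).length := by
    simp
  rw [hlen, bitsA_length]
  rw [PySem.List.pyRange_neg_one_eq_reverse]
  have hrange : ((-1 : Int) + 1) = 0 := by ring
  have hrange2 : ((PySem.Int.bitLength (m : Int) : Int) - 1 + 1) = (PySem.Int.bitLength (m : Int) : Int) := by ring
  rw [hrange, hrange2]
  rw [List.map_reverse, ← bitsA_eq_nat]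
  simp [List.reverse_append]
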